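-- pv_equiv track=rewrite | github.com/BGU-AiDnD/Debugger | learner/ColdStart/from_weka_to_python.py | process_attributes
-- ===== SOURCE A (Python) =====
-- def process_attributes(bugs):
--     bugs_features = [38, 39, 40, 41, 42, 43, 44, 45, 46, 47, 48, 49, 50, 51, 52, 53, 54, 55, 56, 57, 58, 59, 60, 61, 62,
--                      63, 64, 65, 66, 67, 68, 69, 70, 71, 72, 73, 74, 75, 76, 77, 78, 79, 80, 81, 82, 83, 84, 85, 86, 87,
--                      88, 89, 90, 91, 92, 93, 94, 95, 96, 97, 98, 99, 100, 101, 102, 103, 104, 105, 106, 107, 108, 109,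
--                      110, 111, 112, 113, 114, 115, 116, 117, 118]
--     all= [( "tot_changes", "NUMERIC"), ( "sum_insert", "NUMERIC"),
--           ( "sum_delets", "NUMERIC"),( "count_insert", "NUMERIC"),
--           ( "count_delets", "NUMERIC"),( "avg_insert", "NUMERIC"),
--           ( "avg_delets", "NUMERIC"),( "avg_insert_nonzero", "NUMERIC"),
--           ( "avg_delets_nonzero", "NUMERIC"), ( "tot_bugs", "NUMERIC"),( "tot_changes_last", "NUMERIC"), ( "sum_insert_last", "NUMERIC"),
--           ( "sum_delet_lasts", "NUMERIC"),( "count_insert_last", "NUMERIC"),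
--           ( "count_delets_last", "NUMERIC"),( "avg_insert_last", "NUMERIC"),
--           ( "avg_delets_last", "NUMERIC"),( "avg_insert_nonzero_last", "NUMERIC"),
--           ( "avg_delets_nonzero_last", "NUMERIC"), ( "tot_bugs_last", "NUMERIC"), ( "tot_developers", "NUMERIC"),
--           ( "lastVer_tot_developers", "NUMERIC"),( "last_commit", "NUMERIC"),( "last_bug", "NUMERIC"),( "last_bug_binary", "NUMERIC"),
--           ( "change_set", "NUMERIC"), ( "age", "NUMERIC"),( "age2", "NUMERIC"),( "tot_changes_bugged", "NUMERIC"), ( "sum_insert_bugged", "NUMERIC"),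
--           ( "sum_delet_buggeds", "NUMERIC"),( "count_insert_bugged", "NUMERIC"),
--           ( "count_delets_bugged", "NUMERIC"),( "avg_insert_bugged", "NUMERIC"),
--           ( "avg_delets_bugged", "NUMERIC"),( "avg_insert_nonzero_bugged", "NUMERIC"),
--           ( "avg_delets_nonzero_bugged", "NUMERIC"),
--
--           ( "tot_changes_p3", "NUMERIC"), ( "sum_insert_p3", "NUMERIC"),
--           ( "sum_delet_p3s", "NUMERIC"),( "count_insert_p3", "NUMERIC"),
--           ( "count_delets_p3", "NUMERIC"),( "avg_insert_p3", "NUMERIC"),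
--           ( "avg_delets_p3", "NUMERIC"),( "avg_insert_nonzero_p3", "NUMERIC"),
--           ( "avg_delets_nonzero_p3", "NUMERIC"),
--
--           ( "tot_changes_normal", "NUMERIC"), ( "sum_insert_normal", "NUMERIC"),
--           ( "sum_delet_normals", "NUMERIC"),( "count_insert_normal", "NUMERIC"),
--           ( "count_delets_normal", "NUMERIC"),( "avg_insert_normal", "NUMERIC"),
--           ( "avg_delets_normal", "NUMERIC"),( "avg_insert_nonzero_normal", "NUMERIC"),
--           ( "avg_delets_nonzero_normal", "NUMERIC"),
--
--           ( "tot_changes_enhancement", "NUMERIC"), ( "sum_insert_enhancement", "NUMERIC"),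
--           ( "sum_delet_enhancements", "NUMERIC"),( "count_insert_enhancement", "NUMERIC"),
--           ( "count_delets_enhancement", "NUMERIC"),( "avg_insert_enhancement", "NUMERIC"),
--           ( "avg_delets_enhancement", "NUMERIC"),( "avg_insert_nonzero_enhancement", "NUMERIC"),
--           ( "avg_delets_nonzero_enhancement", "NUMERIC"),
--
--           ( "tot_changes_major", "NUMERIC"), ( "sum_insert_major", "NUMERIC"),
--           ( "sum_delet_majors", "NUMERIC"),( "count_insert_major", "NUMERIC"),
--           ( "count_delets_major", "NUMERIC"),( "avg_insert_major", "NUMERIC"),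
--           ( "avg_delets_major", "NUMERIC"),( "avg_insert_nonzero_major", "NUMERIC"),
--           ( "avg_delets_nonzero_major", "NUMERIC"),
--           ( "tot_changes_Ranking", "NUMERIC"), ( "sum_insert_Ranking", "NUMERIC"),
--           ( "sum_delet_Rankings", "NUMERIC"),( "count_insert_Ranking", "NUMERIC"),
--           ( "count_delets_Ranking", "NUMERIC"),( "avg_insert_Ranking", "NUMERIC"),
--           ( "avg_delets_Ranking", "NUMERIC"),( "avg_insert_nonzero_Ranking", "NUMERIC"),
--           ( "avg_delets_nonzero_Ranking", "NUMERIC"),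
--
--
--           ( "avg_submit", "NUMERIC"),
--           ( "avg_modify", "NUMERIC"),
--           ( "distinct_OS", "NUMERIC"),
--           ( "distinct_assignedTo", "NUMERIC"),
--           ( "distinct_Hardware", "NUMERIC"),
--           ( "distinct_Component", "NUMERIC"),
--           ( "distinct_Version", "NUMERIC"),
--           ( "count_Block", "NUMERIC"),
--           ( "count_Depends", "NUMERIC"),
--
--           ( "p1_count", "NUMERIC"), ( "p2_count", "NUMERIC"), ( "p3_count", "NUMERIC"), ( "p4_count", "NUMERIC"), ( "p5_count", "NUMERIC") ,
--           ( "p1_count_perc", "NUMERIC"), ( "p2_count_perc", "NUMERIC"), ( "p3_count_perc", "NUMERIC"), ( "p4_count_perc", "NUMERIC"), ( "p5_count_perc", "NUMERIC") ,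
--
--           ( "minor_count", "NUMERIC"), ( "normal_count", "NUMERIC"), ( "major_count", "NUMERIC"), ( "enhancement_count", "NUMERIC"), ( "critical_count", "NUMERIC"), ( "blocker_count", "NUMERIC"), ( "trivial_count", "NUMERIC"),
--           ( "minor_count_perc", "NUMERIC"), ( "normal_count_perc", "NUMERIC"), ( "major_count_perc", "NUMERIC"), ( "enhancement_count_perc", "NUMERIC"), ( "critical_count_perc", "NUMERIC"), ( "blocker_count_perc", "NUMERIC"), ( "trivial_count_perc", "NUMERIC"),
--
--           ( "avg_commits_files", "NUMERIC"),
--           ( "avg_commits_files_bugged", "NUMERIC"),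
--           ( "avg_commits_files_valid", "NUMERIC")
--           ]
--     ret=[]
--     if bugs:
--         for i in range(len(all)):
--             if i+1 in bugs_features:
--                 ret.append(all[i])
--     else:
--         for i in range(len(all)):
--             if i+1 not in bugs_features:
--                 ret.append(all[i])
--
--     return ret
-- ===== SOURCE B (Python) =====
-- def process_attributes(bugs):
--     # The fixed attribute table, stored as two staged name lists: the 37
--     # general attributes and the 81 bug-feature attributes; the requested
--     # group is paired with its (constant) "NUMERIC" type on the way out.
--     general_names = [
--         'tot_changes',
--         'sum_insert',
--         'sum_delets',
--         'count_insert',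
--         'count_delets',
--         'avg_insert',
--         'avg_delets',
--         'avg_insert_nonzero',
--         'avg_delets_nonzero',
--         'tot_bugs',
--         'tot_changes_last',
--         'sum_insert_last',
--         'sum_delet_lasts',
--         'count_insert_last',
--         'count_delets_last',
--         'avg_insert_last',
--         'avg_delets_last',
--         'avg_insert_nonzero_last',
--         'avg_delets_nonzero_last',
--         'tot_bugs_last',
--         'tot_developers',
--         'lastVer_tot_developers',
--         'last_commit',
--         'last_bug',
--         'last_bug_binary',
--         'change_set',
--         'age',
--         'age2',
--         'tot_changes_bugged',
--         'sum_insert_bugged',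
--         'sum_delet_buggeds',
--         'count_insert_bugged',
--         'count_delets_bugged',
--         'avg_insert_bugged',
--         'avg_delets_bugged',
--         'avg_insert_nonzero_bugged',
--         'avg_delets_nonzero_bugged'
--         ]
--     bug_names = [
--         'tot_changes_p3',
--         'sum_insert_p3',
--         'sum_delet_p3s',
--         'count_insert_p3',
--         'count_delets_p3',
--         'avg_insert_p3',
--         'avg_delets_p3',
--         'avg_insert_nonzero_p3',
--         'avg_delets_nonzero_p3',
--         'tot_changes_normal',
--         'sum_insert_normal',
--         'sum_delet_normals',
--         'count_insert_normal',
--         'count_delets_normal',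
--         'avg_insert_normal',
--         'avg_delets_normal',
--         'avg_insert_nonzero_normal',
--         'avg_delets_nonzero_normal',
--         'tot_changes_enhancement',
--         'sum_insert_enhancement',
--         'sum_delet_enhancements',
--         'count_insert_enhancement',
--         'count_delets_enhancement',
--         'avg_insert_enhancement',
--         'avg_delets_enhancement',
--         'avg_insert_nonzero_enhancement',
--         'avg_delets_nonzero_enhancement',
--         'tot_changes_major',
--         'sum_insert_major',
--         'sum_delet_majors',
--         'count_insert_major',
--         'count_delets_major',
--         'avg_insert_major',
--         'avg_delets_major',
--         'avg_insert_nonzero_major',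
--         'avg_delets_nonzero_major',
--         'tot_changes_Ranking',
--         'sum_insert_Ranking',
--         'sum_delet_Rankings',
--         'count_insert_Ranking',
--         'count_delets_Ranking',
--         'avg_insert_Ranking',
--         'avg_delets_Ranking',
--         'avg_insert_nonzero_Ranking',
--         'avg_delets_nonzero_Ranking',
--         'avg_submit',
--         'avg_modify',
--         'distinct_OS',
--         'distinct_assignedTo',
--         'distinct_Hardware',
--         'distinct_Component',
--         'distinct_Version',
--         'count_Block',
--         'count_Depends',
--         'p1_count',
--         'p2_count',
--         'p3_count',
--         'p4_count',
--         'p5_count',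
--         'p1_count_perc',
--         'p2_count_perc',
--         'p3_count_perc',
--         'p4_count_perc',
--         'p5_count_perc',
--         'minor_count',
--         'normal_count',
--         'major_count',
--         'enhancement_count',
--         'critical_count',
--         'blocker_count',
--         'trivial_count',
--         'minor_count_perc',
--         'normal_count_perc',
--         'major_count_perc',
--         'enhancement_count_perc',
--         'critical_count_perc',
--         'blocker_count_perc',
--         'trivial_count_perc',
--         'avg_commits_files',
--         'avg_commits_files_bugged',
--         'avg_commits_files_valid'
--         ]
--     names = bug_names if bugs else general_names
--     return [(n, "NUMERIC") for n in names]
-- ===== Notes on version B (the rewrite author's own statement) =====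
-- stated objective: simpler
-- what changed: Replaces the single pair table plus a per-index loop testing membership in bugs_features with two staged name-only lists (the 37 general names and the 81 bug-feature names, using that bugs_features is exactly indices 38..118); the selected list is paired with the constant "NUMERIC" type by a single map.
import Mathlib
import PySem

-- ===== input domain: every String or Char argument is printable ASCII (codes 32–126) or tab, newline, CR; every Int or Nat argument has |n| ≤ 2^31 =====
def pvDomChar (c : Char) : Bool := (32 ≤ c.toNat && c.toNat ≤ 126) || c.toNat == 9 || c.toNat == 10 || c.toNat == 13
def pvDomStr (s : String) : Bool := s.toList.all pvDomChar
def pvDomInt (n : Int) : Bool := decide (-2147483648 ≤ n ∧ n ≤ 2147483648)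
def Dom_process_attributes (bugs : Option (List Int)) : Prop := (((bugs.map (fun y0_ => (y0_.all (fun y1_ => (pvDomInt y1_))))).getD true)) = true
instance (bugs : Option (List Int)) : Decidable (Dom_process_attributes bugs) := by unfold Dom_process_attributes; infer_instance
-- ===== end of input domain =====

set_option maxRecDepth 4000


-- B replaces A's pair table + per-index membership loop by two staged name lists
-- (general / bug-feature), selecting one and pairing it with "NUMERIC" (simpler).
-- ===== PORT A =====
def process_attributes (bugs : Option (List Int)) : List (String × String) :=
  let bugs_features : List Int := [38, 39, 40, 41, 42, 43, 44, 45, 46, 47, 48, 49, 50, 51, 52, 53, 54, 55, 56, 57, 58, 59, 60, 61, 62, 63, 64, 65, 66, 67, 68, 69, 70, 71, 72, 73, 74, 75, 76, 77, 78, 79, 80, 81, 82, 83, 84, 85, 86, 87, 88, 89, 90, 91, 92, 93, 94, 95, 96, 97, 98, 99, 100, 101, 102, 103, 104, 105, 106, 107, 108, 109, 110, 111, 112, 113, 114, 115, 116, 117, 118]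
  let all : List (String × String) := [
    ("tot_changes", "NUMERIC"),
    ("sum_insert", "NUMERIC"),
    ("sum_delets", "NUMERIC"),
    ("count_insert", "NUMERIC"),
    ("count_delets", "NUMERIC"),
    ("avg_insert", "NUMERIC"),
    ("avg_delets", "NUMERIC"),
    ("avg_insert_nonzero", "NUMERIC"),
    ("avg_delets_nonzero", "NUMERIC"),
    ("tot_bugs", "NUMERIC"),
    ("tot_changes_last", "NUMERIC"),
    ("sum_insert_last", "NUMERIC"),
    ("sum_delet_lasts", "NUMERIC"),
    ("count_insert_last", "NUMERIC"),
    ("count_delets_last", "NUMERIC"),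
    ("avg_insert_last", "NUMERIC"),
    ("avg_delets_last", "NUMERIC"),
    ("avg_insert_nonzero_last", "NUMERIC"),
    ("avg_delets_nonzero_last", "NUMERIC"),
    ("tot_bugs_last", "NUMERIC"),
    ("tot_developers", "NUMERIC"),
    ("lastVer_tot_developers", "NUMERIC"),
    ("last_commit", "NUMERIC"),
    ("last_bug", "NUMERIC"),
    ("last_bug_binary", "NUMERIC"),
    ("change_set", "NUMERIC"),
    ("age", "NUMERIC"),
    ("age2", "NUMERIC"),
    ("tot_changes_bugged", "NUMERIC"),
    ("sum_insert_bugged", "NUMERIC"),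
    ("sum_delet_buggeds", "NUMERIC"),
    ("count_insert_bugged", "NUMERIC"),
    ("count_delets_bugged", "NUMERIC"),
    ("avg_insert_bugged", "NUMERIC"),
    ("avg_delets_bugged", "NUMERIC"),
    ("avg_insert_nonzero_bugged", "NUMERIC"),
    ("avg_delets_nonzero_bugged", "NUMERIC"),
    ("tot_changes_p3", "NUMERIC"),
    ("sum_insert_p3", "NUMERIC"),
    ("sum_delet_p3s", "NUMERIC"),
    ("count_insert_p3", "NUMERIC"),
    ("count_delets_p3", "NUMERIC"),
    ("avg_insert_p3", "NUMERIC"),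
    ("avg_delets_p3", "NUMERIC"),
    ("avg_insert_nonzero_p3", "NUMERIC"),
    ("avg_delets_nonzero_p3", "NUMERIC"),
    ("tot_changes_normal", "NUMERIC"),
    ("sum_insert_normal", "NUMERIC"),
    ("sum_delet_normals", "NUMERIC"),
    ("count_insert_normal", "NUMERIC"),
    ("count_delets_normal", "NUMERIC"),
    ("avg_insert_normal", "NUMERIC"),
    ("avg_delets_normal", "NUMERIC"),
    ("avg_insert_nonzero_normal", "NUMERIC"),
    ("avg_delets_nonzero_normal", "NUMERIC"),
    ("tot_changes_enhancement", "NUMERIC"),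
    ("sum_insert_enhancement", "NUMERIC"),
    ("sum_delet_enhancements", "NUMERIC"),
    ("count_insert_enhancement", "NUMERIC"),
    ("count_delets_enhancement", "NUMERIC"),
    ("avg_insert_enhancement", "NUMERIC"),
    ("avg_delets_enhancement", "NUMERIC"),
    ("avg_insert_nonzero_enhancement", "NUMERIC"),
    ("avg_delets_nonzero_enhancement", "NUMERIC"),
    ("tot_changes_major", "NUMERIC"),
    ("sum_insert_major", "NUMERIC"),
    ("sum_delet_majors", "NUMERIC"),
    ("count_insert_major", "NUMERIC"),
    ("count_delets_major", "NUMERIC"),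
    ("avg_insert_major", "NUMERIC"),
    ("avg_delets_major", "NUMERIC"),
    ("avg_insert_nonzero_major", "NUMERIC"),
    ("avg_delets_nonzero_major", "NUMERIC"),
    ("tot_changes_Ranking", "NUMERIC"),
    ("sum_insert_Ranking", "NUMERIC"),
    ("sum_delet_Rankings", "NUMERIC"),
    ("count_insert_Ranking", "NUMERIC"),
    ("count_delets_Ranking", "NUMERIC"),
    ("avg_insert_Ranking", "NUMERIC"),
    ("avg_delets_Ranking", "NUMERIC"),
    ("avg_insert_nonzero_Ranking", "NUMERIC"),
    ("avg_delets_nonzero_Ranking", "NUMERIC"),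
    ("avg_submit", "NUMERIC"),
    ("avg_modify", "NUMERIC"),
    ("distinct_OS", "NUMERIC"),
    ("distinct_assignedTo", "NUMERIC"),
    ("distinct_Hardware", "NUMERIC"),
    ("distinct_Component", "NUMERIC"),
    ("distinct_Version", "NUMERIC"),
    ("count_Block", "NUMERIC"),
    ("count_Depends", "NUMERIC"),
    ("p1_count", "NUMERIC"),
    ("p2_count", "NUMERIC"),
    ("p3_count", "NUMERIC"),
    ("p4_count", "NUMERIC"),
    ("p5_count", "NUMERIC"),
    ("p1_count_perc", "NUMERIC"),
    ("p2_count_perc", "NUMERIC"),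
    ("p3_count_perc", "NUMERIC"),
    ("p4_count_perc", "NUMERIC"),
    ("p5_count_perc", "NUMERIC"),
    ("minor_count", "NUMERIC"),
    ("normal_count", "NUMERIC"),
    ("major_count", "NUMERIC"),
    ("enhancement_count", "NUMERIC"),
    ("critical_count", "NUMERIC"),
    ("blocker_count", "NUMERIC"),
    ("trivial_count", "NUMERIC"),
    ("minor_count_perc", "NUMERIC"),
    ("normal_count_perc", "NUMERIC"),
    ("major_count_perc", "NUMERIC"),
    ("enhancement_count_perc", "NUMERIC"),
    ("critical_count_perc", "NUMERIC"),
    ("blocker_count_perc", "NUMERIC"),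
    ("trivial_count_perc", "NUMERIC"),
    ("avg_commits_files", "NUMERIC"),
    ("avg_commits_files_bugged", "NUMERIC"),
    ("avg_commits_files_valid", "NUMERIC")]
  let ret : List (String × String) := []
  -- Python truthiness of `bugs`: None and [] are falsy
  if (match bugs with | none => false | some l => !l.isEmpty) then
    (List.range all.length).foldl (fun ret i =>
      if ((i : Int) + 1) ∈ bugs_features then ret ++ [(PySem.List.pyGet? all (i : Int)).getD ("", "")] else ret) ret
  else
    (List.range all.length).foldl (fun ret i =>
      if ¬ (((i : Int) + 1) ∈ bugs_features) then ret ++ [(PySem.List.pyGet? all (i : Int)).getD ("", "")] else ret) ret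

-- ===== PORT B =====
def process_attributes_alt (bugs : Option (List Int)) : List (String × String) :=
  let general_names : List String := [
    "tot_changes",
    "sum_insert",
    "sum_delets",
    "count_insert",
    "count_delets",
    "avg_insert",
    "avg_delets",
    "avg_insert_nonzero",
    "avg_delets_nonzero",
    "tot_bugs",
    "tot_changes_last",
    "sum_insert_last",
    "sum_delet_lasts",
    "count_insert_last",
    "count_delets_last",
    "avg_insert_last",
    "avg_delets_last",
    "avg_insert_nonzero_last",
    "avg_delets_nonzero_last",
    "tot_bugs_last",
    "tot_developers",
    "lastVer_tot_developers",
    "last_commit",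
    "last_bug",
    "last_bug_binary",
    "change_set",
    "age",
    "age2",
    "tot_changes_bugged",
    "sum_insert_bugged",
    "sum_delet_buggeds",
    "count_insert_bugged",
    "count_delets_bugged",
    "avg_insert_bugged",
    "avg_delets_bugged",
    "avg_insert_nonzero_bugged",
    "avg_delets_nonzero_bugged"]
  let bug_names : List String := [
    "tot_changes_p3",
    "sum_insert_p3",
    "sum_delet_p3s",
    "count_insert_p3",
    "count_delets_p3",
    "avg_insert_p3",
    "avg_delets_p3",
    "avg_insert_nonzero_p3",
    "avg_delets_nonzero_p3",
    "tot_changes_normal",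
    "sum_insert_normal",
    "sum_delet_normals",
    "count_insert_normal",
    "count_delets_normal",
    "avg_insert_normal",
    "avg_delets_normal",
    "avg_insert_nonzero_normal",
    "avg_delets_nonzero_normal",
    "tot_changes_enhancement",
    "sum_insert_enhancement",
    "sum_delet_enhancements",
    "count_insert_enhancement",
    "count_delets_enhancement",
    "avg_insert_enhancement",
    "avg_delets_enhancement",
    "avg_insert_nonzero_enhancement",
    "avg_delets_nonzero_enhancement",
    "tot_changes_major",
    "sum_insert_major",
    "sum_delet_majors",
    "count_insert_major",
    "count_delets_major",
    "avg_insert_major",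
    "avg_delets_major",
    "avg_insert_nonzero_major",
    "avg_delets_nonzero_major",
    "tot_changes_Ranking",
    "sum_insert_Ranking",
    "sum_delet_Rankings",
    "count_insert_Ranking",
    "count_delets_Ranking",
    "avg_insert_Ranking",
    "avg_delets_Ranking",
    "avg_insert_nonzero_Ranking",
    "avg_delets_nonzero_Ranking",
    "avg_submit",
    "avg_modify",
    "distinct_OS",
    "distinct_assignedTo",
    "distinct_Hardware",
    "distinct_Component",
    "distinct_Version",
    "count_Block",
    "count_Depends",
    "p1_count",
    "p2_count",
    "p3_count",
    "p4_count",
    "p5_count",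
    "p1_count_perc",
    "p2_count_perc",
    "p3_count_perc",
    "p4_count_perc",
    "p5_count_perc",
    "minor_count",
    "normal_count",
    "major_count",
    "enhancement_count",
    "critical_count",
    "blocker_count",
    "trivial_count",
    "minor_count_perc",
    "normal_count_perc",
    "major_count_perc",
    "enhancement_count_perc",
    "critical_count_perc",
    "blocker_count_perc",
    "trivial_count_perc",
    "avg_commits_files",
    "avg_commits_files_bugged",
    "avg_commits_files_valid"]
  let names := if (match bugs with | none => false | some l => !l.isEmpty) then bug_names else general_names
  names.map (fun n => (n, "NUMERIC"))

-- ===== PRECONDITION & SPEC =====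
def Spec_process_attributes (bugs : Option (List Int)) (out : List (String × String)) : Prop := out = process_attributes_alt bugs
instance (bugs : Option (List Int)) (out : List (String × String)) : Decidable (Spec_process_attributes bugs out) := by unfold Spec_process_attributes; infer_instance

-- ===== CLAIM =====
def Claim_equal_process_attributes : Prop := ∀ (bugs : Option (List Int)), Dom_process_attributes bugs → Spec_process_attributes bugs (process_attributes bugs)

-- ===== LEMMAS AND PROOFS =====

-- Both ports depend on `bugs` only through its Python truthiness.
theorem pa_truthy : process_attributes (some [1]) = process_attributes_alt (some [1]) := by decide

theorem pa_falsy : process_attributes none = process_attributes_alt none := by decide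

theorem pa_congr (bugs : Option (List Int)) :
    process_attributes bugs =
      (if (match bugs with | none => false | some l => !l.isEmpty) then process_attributes (some [1]) else process_attributes none) := by
  cases bugs with
  | none => rfl
  | some l => cases l with
    | nil => rfl
    | cons x xs => rfl

theorem pa_alt_congr (bugs : Option (List Int)) :
    process_attributes_alt bugs =
      (if (match bugs with | none => false | some l => !l.isEmpty) then process_attributes_alt (some [1]) else process_attributes_alt none) := by
  cases bugs with
  | none => rfl
  | some l => cases l with
    | nil => rfl
    | cons x xs => rfl

-- ===== VERDICT =====
theorem process_attributes_spec : Claim_equal_process_attributes := by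
  intro bugs _
  unfold Spec_process_attributes
  rw [pa_congr, pa_alt_congr]
  cases hb : (match bugs with | none => false | some l => !l.isEmpty) with
  | true => simpa using pa_truthy
  | false => simpa using pa_falsy
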